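-- pv_equiv track=rewrite | github.com/GCB3220/homework | python2/z_task_8/task_8_1_内容重匹配.py | match_sequence
-- ===== SOURCE A (Python) =====
-- def match_sequence(seq1, seq2):
--     head_count_1 = 0
--     tail_count_1 = len(seq1)
--     head_count_2 = 0
--     tail_count_2 = len(seq2)
--     # 去掉头尾--, 提取配对部分
--     for char in seq1:
--         if char == '-':
--             head_count_1 += 1
--         else:
--             break
--     for char in seq1[::-1]:
--         if char == '-':
--             tail_count_1 -= 1
--         else:
--             break
--
--     for char in seq2:
--         if char == '-':
--             head_count_2 += 1
--         else:
--             break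
--     for char in seq2[::-1]:
--         if char == '-':
--             tail_count_2 -= 1
--         else:
--             break
--     head_true = max(head_count_1, head_count_2)
--     tail_true = min(tail_count_1, tail_count_2)
--     if head_count_1 < head_count_2 or tail_count_1 > tail_count_2:
--         check_l = 'yes'
--     else:
--         check_l = '/'
--
--     return head_true, tail_true, check_l
-- ===== SOURCE B (Python) =====
-- def _span(seq):
--     idxs = [i for i, ch in enumerate(seq) if ch != '-']
--     if idxs:
--         return idxs[0], idxs[-1] + 1
--     return len(seq), 0
--
-- def match_sequence(seq1, seq2):
--     h1, t1 = _span(seq1)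
--     h2, t2 = _span(seq2)
--     check_l = 'yes' if h1 < h2 or t1 > t2 else '/'
--     return max(h1, h2), min(t1, t2), check_l
-- ===== Notes on version B (the rewrite author's own statement) =====
-- stated objective: alternative
-- what changed: Instead of counting leading/trailing dashes with four break-loops (two over reversed copies), B makes one forward pass per string collecting the positions of non-dash characters and reads the boundaries off the first and last collected index.
import Mathlib
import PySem

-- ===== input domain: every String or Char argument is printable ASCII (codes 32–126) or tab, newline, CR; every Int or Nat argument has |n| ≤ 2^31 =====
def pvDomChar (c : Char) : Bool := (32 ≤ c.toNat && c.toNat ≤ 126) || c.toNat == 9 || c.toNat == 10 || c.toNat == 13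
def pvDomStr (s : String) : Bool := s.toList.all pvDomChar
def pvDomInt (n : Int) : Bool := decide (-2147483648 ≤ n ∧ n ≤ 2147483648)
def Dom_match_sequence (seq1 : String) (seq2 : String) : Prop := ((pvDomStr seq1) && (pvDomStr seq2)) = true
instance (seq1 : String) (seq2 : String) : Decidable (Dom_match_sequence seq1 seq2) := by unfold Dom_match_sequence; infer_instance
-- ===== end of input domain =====

-- B replaces A's four dash-counting break-loops (two over reversed copies) by one forward
-- pass per string collecting the positions of non-dash characters and reading the
-- boundaries off the first and last collected index (alternative; same O(n) cost).

-- ===== PORT A =====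
-- the 'for char in …: if char == '-': count += 1 else: break' loop of A
def pvCountLead : List Char → Int
  | [] => 0
  | c :: t => if c = '-' then 1 + pvCountLead t else 0

def match_sequence (seq1 : String) (seq2 : String) : Int × Int × String :=
  let head_count_1 := pvCountLead seq1.toList
  let tail_count_1 := (seq1.toList.length : Int) - pvCountLead seq1.toList.reverse  -- seq1[::-1]
  let head_count_2 := pvCountLead seq2.toList
  let tail_count_2 := (seq2.toList.length : Int) - pvCountLead seq2.toList.reverse
  let head_true := max head_count_1 head_count_2
  let tail_true := min tail_count_1 tail_count_2
  let check_l := if head_count_1 < head_count_2 ∨ tail_count_1 > tail_count_2 then "yes" else "/"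
  (head_true, tail_true, check_l)

-- ===== PORT B =====
-- Source B's comprehension '[i for i, ch in enumerate(seq) if ch != '-']', index-carrying
def pvIdx : List Char → Int → List Int
  | [], _ => []
  | c :: t, i => if c ≠ '-' then i :: pvIdx t (i + 1) else pvIdx t (i + 1)

-- Source B's _span: first/last collected position, or (len, 0) if none
def pvSpan (seq : String) : Int × Int :=
  match pvIdx seq.toList 0 with
  | [] => ((seq.toList.length : Int), 0)
  | f :: rest => (f, rest.getLastD f + 1)   -- idxs[0], idxs[-1] + 1

def match_sequence_alt (seq1 : String) (seq2 : String) : Int × Int × String :=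
  let b1 := pvSpan seq1
  let b2 := pvSpan seq2
  let check_l := if b1.1 < b2.1 ∨ b1.2 > b2.2 then "yes" else "/"
  (max b1.1 b2.1, min b1.2 b2.2, check_l)

-- ===== PRECONDITION & SPEC =====
def Spec_match_sequence (seq1 : String) (seq2 : String) (out : Int × Int × String) : Prop := out = match_sequence_alt seq1 seq2
instance (seq1 : String) (seq2 : String) (out : Int × Int × String) : Decidable (Spec_match_sequence seq1 seq2 out) := by unfold Spec_match_sequence; infer_instance

-- ===== CLAIM (what is proved, stated in full; the proofs are below) =====
def Claim_equal_match_sequence : Prop := ∀ (seq1 : String) (seq2 : String), Dom_match_sequence seq1 seq2 → Spec_match_sequence seq1 seq2 (match_sequence seq1 seq2)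

-- ===== LEMMAS AND PROOFS =====

theorem pvCountLead_eq_takeWhile (l : List Char) :
    pvCountLead l = ((l.takeWhile (· = '-')).length : Int) := by
  induction l with
  | nil => rfl
  | cons c t ih =>
    by_cases h : c = '-' <;> simp [pvCountLead, h, ih]; ring

theorem pvIdx_nil_iff (l : List Char) (i : Int) :
    pvIdx l i = [] ↔ l.dropWhile (· = '-') = [] := by
  induction l generalizing i with
  | nil => simp [pvIdx]
  | cons c t ih =>
    by_cases h : c = '-' <;> simp [pvIdx, h, ih]

theorem pvIdx_head? (l : List Char) (i : Int) (h : l.dropWhile (· = '-') ≠ []) :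
    (pvIdx l i).head? = some (i + ((l.takeWhile (· = '-')).length : Int)) := by
  induction l generalizing i with
  | nil => simp at h
  | cons c t ih =>
    by_cases hc : c = '-'
    · have h' : t.dropWhile (· = '-') ≠ [] := by
        simpa [List.dropWhile_cons, hc] using h
      simp [pvIdx, hc, ih _ h']
      ring
    · simp [pvIdx, hc]

theorem pvIdx_getLast? (l : List Char) (i : Int) (h : l.dropWhile (· = '-') ≠ []) :
    (pvIdx l i).getLast? =
      some (i + (l.length : Int) - 1 - ((l.reverse.takeWhile (· = '-')).length : Int)) := by
  induction l generalizing i with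
  | nil => simp at h
  | cons c t ih =>
    by_cases ht : t.dropWhile (· = '-') = []
    · -- t is all dashes, so c ≠ '-' and this cell is the last collected one
      have hc : c ≠ '-' := by
        intro hc; exact h (by simp [hc, ht])
      have htall : ∀ x ∈ t, x = '-' := by
        intro x hx
        have := List.dropWhile_eq_nil_iff.mp ht
        simpa using this x hx
      have hrev : (t.reverse ++ [c]).takeWhile (· = '-') = t.reverse := by
        have h1 : t.reverse.takeWhile (· = '-') = t.reverse := by
          apply List.takeWhile_eq_self_iff.mpr
          intro x hx; simpa using htall x (List.mem_reverse.mp hx)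
        rw [List.takeWhile_append]
        simp [h1, hc]
      have hnil : pvIdx t (i + 1) = [] := (pvIdx_nil_iff t (i + 1)).mpr ht
      simp [pvIdx, hc, hnil, List.reverse_cons, hrev]
      ring
    · -- t still contains a non-dash: the trailing-dash block of c::t is that of t
      have hne : (t.reverse.takeWhile (· = '-')).length ≠ t.reverse.length := by
        intro he
        have heq := (List.takeWhile_prefix (l := t.reverse) (· = '-')).eq_of_length he
        have hall := List.takeWhile_eq_self_iff.mp heq
        exact ht (List.dropWhile_eq_nil_iff.mpr
          (fun x hx => hall x (List.mem_reverse.mpr hx)))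
      have hrev : (t.reverse ++ [c]).takeWhile (· = '-') = t.reverse.takeWhile (· = '-') := by
        rw [List.takeWhile_append, if_neg hne]
      have hrec := ih (i + 1) ht
      have hnn : pvIdx t (i + 1) ≠ [] := fun he => ht ((pvIdx_nil_iff t (i + 1)).mp he)
      by_cases hc : c = '-'
      · subst hc
        simp [pvIdx, hrec, List.reverse_cons, hrev]
        ring
      · simp [pvIdx, hc, List.getLast?_cons, hrec,
          List.reverse_cons, hrev]
        ring

theorem pvSpan_eq (s : String) :
    pvSpan s = (pvCountLead s.toList,
      (s.toList.length : Int) - pvCountLead s.toList.reverse) := by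
  by_cases h : s.toList.dropWhile (· = '-') = []
  · have hall : ∀ x ∈ s.toList, x = '-' := by
      intro x hx
      have := List.dropWhile_eq_nil_iff.mp h
      simpa using this x hx
    have h1 : s.toList.takeWhile (· = '-') = s.toList := by
      apply List.takeWhile_eq_self_iff.mpr
      intro x hx; simpa using hall x hx
    have h2 : s.toList.reverse.takeWhile (· = '-') = s.toList.reverse := by
      apply List.takeWhile_eq_self_iff.mpr
      intro x hx; simpa using hall x (List.mem_reverse.mp hx)
    have hnil : pvIdx s.toList 0 = [] := (pvIdx_nil_iff s.toList 0).mpr h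
    simp [pvSpan, hnil, pvCountLead_eq_takeWhile, h1, h2]
  · have hne : pvIdx s.toList 0 ≠ [] := fun he => h ((pvIdx_nil_iff s.toList 0).mp he)
    cases hx : pvIdx s.toList 0 with
    | nil => exact absurd hx hne
    | cons f rest =>
      have h1 := pvIdx_head? s.toList 0 h
      have h2 := pvIdx_getLast? s.toList 0 h
      rw [hx] at h1 h2
      simp [List.getLast?_cons] at h1 h2
      subst h1
      simp [pvSpan, hx, pvCountLead_eq_takeWhile, List.getLastD_eq_getLast?]
      omega

-- ===== VERDICT (by name: the statement is the Claim_ definition above) =====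
theorem match_sequence_spec : Claim_equal_match_sequence := by
  intro seq1 seq2 _
  unfold Spec_match_sequence match_sequence match_sequence_alt
  rw [pvSpan_eq, pvSpan_eq]
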